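-- pv_equiv track=rewrite | github.com/simonbrauner/aoc | 19.py | largest_manhattan_distance
-- ===== SOURCE A (Python) =====
-- Coordinates = tuple[int, ...]
--
-- def manhattan_distance(first: Coordinates, second: Coordinates) -> int:
--     return sum([abs(first[x] - second[x]) for x in range(len(first))])
--
-- def largest_manhattan_distance(positions: dict[int, Coordinates]) -> int:
--     largest = 0
--
--     for first in positions.values():
--         for second in positions.values():
--             current = manhattan_distance(first, second)
--             if current > largest:
--                 largest = current
--
--     return largest
-- ===== SOURCE B (Python) =====
-- def largest_manhattan_distance(positions):
--     values = list(positions.values())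
--     if not values:
--         return 0
--     d = len(values[0])
--     best = 0
--     for mask in range(1 << d):
--         sums = [sum(v[i] if (mask >> i) & 1 else -v[i] for i in range(d)) for v in values]
--         spread = max(sums) - min(sums)
--         if spread > best:
--             best = spread
--     return best
-- ===== Notes on version B (the rewrite author's own statement) =====
-- stated objective: faster
-- what changed: Instead of comparing all n^2 pairs of points, B computes, for each of the 2^d sign patterns over the d coordinates, the signed coordinate sums of all points and takes the largest (max - min) spread, which equals the maximum pairwise Manhattan distance; O(2^d * n * d) instead of O(n^2 * d).
import Mathlib
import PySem

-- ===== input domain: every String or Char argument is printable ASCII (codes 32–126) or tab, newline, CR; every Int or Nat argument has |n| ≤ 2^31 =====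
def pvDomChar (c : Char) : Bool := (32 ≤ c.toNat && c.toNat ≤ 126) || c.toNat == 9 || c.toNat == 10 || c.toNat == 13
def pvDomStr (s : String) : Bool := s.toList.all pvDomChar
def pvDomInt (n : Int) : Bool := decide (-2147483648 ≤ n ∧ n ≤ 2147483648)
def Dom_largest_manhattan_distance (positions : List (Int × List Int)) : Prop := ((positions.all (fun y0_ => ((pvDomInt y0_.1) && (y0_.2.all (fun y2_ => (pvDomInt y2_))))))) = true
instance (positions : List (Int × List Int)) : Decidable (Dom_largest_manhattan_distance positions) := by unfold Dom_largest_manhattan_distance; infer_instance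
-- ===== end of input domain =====

-- B replaces A's O(n^2*d) all-pairs scan by the 2^d sign-pattern trick (max-min of signed
-- coordinate sums per pattern), an exact O(2^d*n*d) algorithm; equivalence is proved on
-- inputs whose coordinate tuples all have the same length (elsewhere A raises IndexError).

-- ===== PORT A =====
-- sum([abs(first[x] - second[x]) for x in range(len(first))])
def pvManhattan (first second : List Int) : Int :=
  ((PySem.List.pyRange 0 (first.length : Int) 1).map
    (fun x => |PySem.List.pyGetD first x 0 - PySem.List.pyGetD second x 0|)).sum

def largest_manhattan_distance (positions : List (Int × List Int)) : Int :=
  (PySem.Dict.ofList positions).values.foldl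
    (fun largest first =>
      (PySem.Dict.ofList positions).values.foldl
        (fun largest second =>
          let current := pvManhattan first second
          if current > largest then current else largest)
        largest)
    0

-- ===== PORT B =====
-- sum(v[i] if (mask >> i) & 1 else -v[i] for i in range(d))
def pvSignedSum (mask : Nat) (d : Nat) (v : List Int) : Int :=
  ((List.range d).map
    (fun i => if (mask >>> i) &&& 1 == 1 then PySem.List.pyGetD v (i : Int) 0
              else -PySem.List.pyGetD v (i : Int) 0)).sum

def largest_manhattan_distance_alt (positions : List (Int × List Int)) : Int :=
  let values := (PySem.Dict.ofList positions).values
  if values.isEmpty then 0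
  else
    let d := (values.headD []).length
    (List.range (2 ^ d)).foldl
      (fun best mask =>
        let sums := values.map (fun v => pvSignedSum mask d v)
        let spread := (PySem.List.max? sums id).getD 0 - (PySem.List.min? sums id).getD 0
        if spread > best then spread else best)
      0

-- ===== PRECONDITION & SPEC =====
-- Pre_ excludes exactly the dicts whose coordinate tuples do not all have the same length:
-- on those A raises IndexError (second[x] out of range in some ordered pair).
def Pre_largest_manhattan_distance (positions : List (Int × List Int)) : Prop :=
  ∀ p ∈ positions, ∀ q ∈ positions, p.2.length = q.2.length
instance (positions : List (Int × List Int)) : Decidable (Pre_largest_manhattan_distance positions) := by unfold Pre_largest_manhattan_distance; infer_instance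
def pvWitness_largest_manhattan_distance : (List (Int × List Int)) := [(0, [0, 0]), (1, [3, 4])]

def Spec_largest_manhattan_distance (positions : List (Int × List Int)) (out : Int) : Prop := out = largest_manhattan_distance_alt positions
instance (positions : List (Int × List Int)) (out : Int) : Decidable (Spec_largest_manhattan_distance positions out) := by unfold Spec_largest_manhattan_distance; infer_instance

-- ===== CLAIM (what is proved, stated in full; the proofs are below) =====
def Claim_equal_largest_manhattan_distance : Prop := ∀ (positions : List (Int × List Int)), Dom_largest_manhattan_distance positions → Pre_largest_manhattan_distance positions → Spec_largest_manhattan_distance positions (largest_manhattan_distance positions)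

-- ===== LEMMAS AND PROOFS =====

theorem pv_manhattan_eq (u v : List Int) :
    pvManhattan u v = ((List.range u.length).map (fun i => |u.getD i 0 - v.getD i 0|)).sum := by
  unfold pvManhattan
  rw [PySem.List.pyRange_one]
  simp [List.map_map, Function.comp_def]

theorem pv_manhattan_cons (a b : Int) (u v : List Int) :
    pvManhattan (a :: u) (b :: v) = |a - b| + pvManhattan u v := by
  rw [pv_manhattan_eq, pv_manhattan_eq]
  simp [List.range_succ_eq_map, List.map_map, Function.comp_def]

theorem pv_signedSum_zero (m : Nat) (v : List Int) : pvSignedSum m 0 v = 0 := by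
  simp [pvSignedSum]

theorem pv_signedSum_cons (m d : Nat) (a : Int) (u : List Int) :
    pvSignedSum m (d + 1) (a :: u)
      = (if m &&& 1 == 1 then a else -a) + pvSignedSum (m >>> 1) d u := by
  unfold pvSignedSum
  rw [List.range_succ_eq_map]
  simp only [List.map_cons, List.sum_cons, List.map_map]
  congr 1
  · simp
  · apply congrArg List.sum
    apply List.map_congr_left
    intro i _
    have hsh : m >>> (i + 1) = (m >>> 1) >>> i := by
      rw [Nat.add_comm, Nat.shiftRight_add]
    simp [Nat.succ_eq_add_one, hsh]

theorem pv_signedSum_sub_le (u : List Int) :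
    ∀ (v : List Int) (d m : Nat), u.length = d → v.length = d →
      pvSignedSum m d u - pvSignedSum m d v ≤ pvManhattan u v := by
  induction u with
  | nil =>
    intro v d m hu hv
    have hd0 : d = 0 := by simpa using hu.symm
    have : v = [] := List.eq_nil_of_length_eq_zero (by omega)
    subst this
    simp [pv_signedSum_zero, ← hu, pv_manhattan_eq]
  | cons a u ih =>
    intro v d m hu hv
    cases v with
    | nil => simp only [List.length_cons, List.length_nil] at hu hv; omega
    | cons b v =>
      cases d with
      | zero => simp at hu
      | succ d =>
        have h1 := ih v d (m >>> 1) (by simpa using hu) (by simpa using hv)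
        rw [pv_signedSum_cons, pv_signedSum_cons, pv_manhattan_cons]
        have h2 := le_abs_self (a - b)
        have h3 := neg_abs_le (a - b)
        split_ifs <;> linarith

theorem pv_exists_mask (u : List Int) :
    ∀ (v : List Int) (d : Nat), u.length = d → v.length = d →
      ∃ m : Nat, m < 2 ^ d ∧ pvSignedSum m d u - pvSignedSum m d v = pvManhattan u v := by
  induction u with
  | nil =>
    intro v d hu hv
    have hd0 : d = 0 := by simpa using hu.symm
    have : v = [] := List.eq_nil_of_length_eq_zero (by omega)
    subst this
    refine ⟨0, ?_, ?_⟩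
    · positivity
    · simp [pv_signedSum_zero, ← hu, pv_manhattan_eq]
  | cons a u ih =>
    intro v d hu hv
    cases v with
    | nil => simp only [List.length_cons, List.length_nil] at hu hv; omega
    | cons b v =>
      cases d with
      | zero => simp at hu
      | succ d =>
        obtain ⟨m', hm', he⟩ := ih v d (by simpa using hu) (by simpa using hv)
        by_cases hab : b ≤ a
        · refine ⟨2 * m' + 1, by rw [pow_succ]; omega, ?_⟩
          rw [pv_signedSum_cons, pv_signedSum_cons, pv_manhattan_cons]
          have hand : (2 * m' + 1) &&& 1 = 1 := by rw [Nat.and_one_is_mod]; omega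
          have hsh : (2 * m' + 1) >>> 1 = m' := by rw [Nat.shiftRight_one]; omega
          rw [hand, hsh]
          have : |a - b| = a - b := abs_of_nonneg (by omega)
          simp only [BEq.rfl, if_pos]
          rw [this] at *
          omega
        · refine ⟨2 * m', by rw [pow_succ]; omega, ?_⟩
          rw [pv_signedSum_cons, pv_signedSum_cons, pv_manhattan_cons]
          have hand : (2 * m') &&& 1 = 0 := by rw [Nat.and_one_is_mod]; omega
          have hsh : (2 * m') >>> 1 = m' := by rw [Nat.shiftRight_one]; omega
          rw [hand, hsh]
          have : |a - b| = -(a - b) := abs_of_neg (by omega)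
          simp only [show ((0 : Nat) == 1) = false from rfl, Bool.false_eq_true, if_false]
          rw [this] at *
          omega

theorem pv_foldl_ite_max {α : Type} (f : α → Int) (l : List α) (init : Int) :
    l.foldl (fun a x => if f x > a then f x else a) init
      = l.foldl (fun a x => max a (f x)) init := by
  induction l generalizing init with
  | nil => rfl
  | cons x t ih =>
    simp only [List.foldl_cons, ih]
    congr 1
    rw [max_def]
    split_ifs <;> omega

theorem pv_foldl_max_le {l : List Int} {init c : Int} (h0 : init ≤ c)
    (h : ∀ x ∈ l, x ≤ c) : l.foldl max init ≤ c := by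
  induction l generalizing init with
  | nil => exact h0
  | cons x t ih =>
    simp only [List.foldl_cons]
    exact ih (max_le h0 (h x (by simp))) (fun y hy => h y (by simp [hy]))

theorem pv_nested_norm (l₁ l₂ : List (List Int)) (init : Int) :
    l₁.foldl (fun a u => l₂.foldl
        (fun a v => if pvManhattan u v > a then pvManhattan u v else a) a) init
      = (l₁.flatMap (fun u => l₂.map (fun v => pvManhattan u v))).foldl max init := by
  induction l₁ generalizing init with
  | nil => rfl
  | cons u t ih =>
    simp only [List.foldl_cons, List.flatMap_cons, List.foldl_append, ih]
    congr 1
    rw [pv_foldl_ite_max, List.foldl_map]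

theorem pv_core (vals : List (List Int)) (d : Nat)
    (hd : ∀ v ∈ vals, v.length = d) (hne : vals ≠ []) :
    (vals.flatMap (fun u => vals.map (fun v => pvManhattan u v))).foldl max 0
      = ((List.range (2 ^ d)).map (fun mask =>
          (PySem.List.max? (vals.map (fun v => pvSignedSum mask d v)) id).getD 0
            - (PySem.List.min? (vals.map (fun v => pvSignedSum mask d v)) id).getD 0)).foldl max 0 := by
  apply le_antisymm
  · apply pv_foldl_max_le (PySem.List.le_foldl_max _ 0).1
    intro x hx
    simp only [List.mem_flatMap, List.mem_map] at hx
    obtain ⟨u, hu, v, hv, rfl⟩ := hx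
    obtain ⟨m, hm, he⟩ := pv_exists_mask u v d (hd u hu) (hd v hv)
    set sums := vals.map (fun v => pvSignedSum m d v) with hsums
    have hsne : sums ≠ [] := by
      simp [hsums, hne]
    obtain ⟨M, hM⟩ : ∃ M, PySem.List.max? sums id = some M := by
      cases hmx : PySem.List.max? sums id with
      | none => exact absurd ((PySem.List.max?_eq_none_iff sums id).mp hmx) hsne
      | some M => exact ⟨M, rfl⟩
    obtain ⟨mn, hmn⟩ : ∃ mn, PySem.List.min? sums id = some mn := by
      cases hmx : PySem.List.min? sums id with
      | none => exact absurd ((PySem.List.min?_eq_none_iff sums id).mp hmx) hsne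
      | some mn => exact ⟨mn, rfl⟩
    have hsu : pvSignedSum m d u ∈ sums := List.mem_map_of_mem hu
    have hsv : pvSignedSum m d v ∈ sums := List.mem_map_of_mem hv
    have h1 : pvSignedSum m d u ≤ M := PySem.List.max?_isMax hM _ hsu
    have h2 : mn ≤ pvSignedSum m d v := PySem.List.min?_isMin hmn _ hsv
    have hmem : (PySem.List.max? sums id).getD 0 - (PySem.List.min? sums id).getD 0
        ∈ (List.range (2 ^ d)).map (fun mask =>
          (PySem.List.max? (vals.map (fun v => pvSignedSum mask d v)) id).getD 0
            - (PySem.List.min? (vals.map (fun v => pvSignedSum mask d v)) id).getD 0) := by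
      rw [hsums]
      exact List.mem_map_of_mem (List.mem_range.mpr hm)
    calc pvManhattan u v = pvSignedSum m d u - pvSignedSum m d v := he.symm
      _ ≤ M - mn := by omega
      _ = (PySem.List.max? sums id).getD 0 - (PySem.List.min? sums id).getD 0 := by
          rw [hM, hmn]; rfl
      _ ≤ _ := (PySem.List.le_foldl_max _ 0).2 _ hmem
  · apply pv_foldl_max_le (PySem.List.le_foldl_max _ 0).1
    intro x hx
    simp only [List.mem_map, List.mem_range] at hx
    obtain ⟨m, hm, rfl⟩ := hx
    set sums := vals.map (fun v => pvSignedSum m d v) with hsums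
    have hsne : sums ≠ [] := by simp [hsums, hne]
    obtain ⟨M, hM⟩ : ∃ M, PySem.List.max? sums id = some M := by
      cases hmx : PySem.List.max? sums id with
      | none => exact absurd ((PySem.List.max?_eq_none_iff sums id).mp hmx) hsne
      | some M => exact ⟨M, rfl⟩
    obtain ⟨mn, hmn⟩ : ∃ mn, PySem.List.min? sums id = some mn := by
      cases hmx : PySem.List.min? sums id with
      | none => exact absurd ((PySem.List.min?_eq_none_iff sums id).mp hmx) hsne
      | some mn => exact ⟨mn, rfl⟩
    obtain ⟨u, hu, hMu⟩ := List.mem_map.mp (PySem.List.max?_mem hM)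
    obtain ⟨v, hv, hmv⟩ := List.mem_map.mp (PySem.List.min?_mem hmn)
    have hle := pv_signedSum_sub_le u v d m (hd u hu) (hd v hv)
    have hmem : pvManhattan u v
        ∈ vals.flatMap (fun u => vals.map (fun v => pvManhattan u v)) :=
      List.mem_flatMap.mpr ⟨u, hu, List.mem_map_of_mem hv⟩
    calc (PySem.List.max? sums id).getD 0 - (PySem.List.min? sums id).getD 0
        = M - mn := by rw [hM, hmn]; rfl
      _ = pvSignedSum m d u - pvSignedSum m d v := by rw [hMu, hmv]
      _ ≤ pvManhattan u v := hle
      _ ≤ _ := (PySem.List.le_foldl_max _ 0).2 _ hmem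

theorem pv_mem_values_update {κ ν : Type} [BEq κ] [LawfulBEq κ]
    (ps : List (κ × ν)) (d : PySem.Dict κ ν) (w : ν)
    (h : w ∈ (d.update ps).values) : w ∈ d.values ∨ ∃ k, (k, w) ∈ ps := by
  induction ps generalizing d with
  | nil => exact Or.inl h
  | cons p t ih =>
    have h' : w ∈ ((d.insert p.1 p.2).update t).values := h
    rcases ih (d.insert p.1 p.2) h' with h2 | ⟨k, hk⟩
    · rcases PySem.Dict.mem_values_insert d p.1 p.2 w h2 with rfl | h3
      · exact Or.inr ⟨p.1, by simp⟩
      · exact Or.inl h3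
    · exact Or.inr ⟨k, by simp [hk]⟩

theorem pv_mem_values_ofList {v : List Int} {ps : List (Int × List Int)}
    (h : v ∈ (PySem.Dict.ofList ps).values) : ∃ k, (k, v) ∈ ps := by
  rcases pv_mem_values_update ps PySem.Dict.empty v h with h2 | h2
  · simp [PySem.Dict.empty, PySem.Dict.values] at h2
  · exact h2

-- ===== VERDICT (by name: the statement is the Claim_ definition above) =====
theorem largest_manhattan_distance_spec : Claim_equal_largest_manhattan_distance := by
  intro positions _hdom hpre
  unfold Spec_largest_manhattan_distance
  unfold largest_manhattan_distance largest_manhattan_distance_alt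
  cases hvals : (PySem.Dict.ofList positions).values with
  | nil => simp
  | cons w ws =>
    have hd : ∀ v ∈ (w :: ws), v.length = w.length := by
      intro v hv
      rw [← hvals] at hv
      obtain ⟨k1, hk1⟩ := pv_mem_values_ofList hv
      obtain ⟨k2, hk2⟩ := pv_mem_values_ofList (by rw [hvals]; exact List.mem_cons_self ..)
      exact hpre _ hk1 _ hk2
    simp only [List.isEmpty_cons, List.headD_cons, Bool.false_eq_true, if_false]
    rw [pv_nested_norm, pv_foldl_ite_max]
    conv_rhs => rw [← List.foldl_map]
    exact pv_core (w :: ws) w.length hd (by simp)
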